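-- pv_equiv track=rewrite | github.com/m-GDEV/aoc | day3.py | num_before_num
-- ===== SOURCE A (Python) =====
-- def num_before_num(list, num1, num2):
--     n1_index = -55
--     n2_index = -55
--     for i in range(len(list)):
--         if list[i] == num1:
--             n1_index = i
--         if list[i] == num2:
--             n2_index = i
--
--     if n1_index == -55 or n2_index == -55:
--         raise Exception("One of the numbers is not in the list")
--
--     if n1_index < n2_index:
--         return True
--     else:
--         return False
-- ===== SOURCE B (Python) =====
-- def num_before_num(list, num1, num2):
--     if num1 not in list or num2 not in list:
--         raise Exception("One of the numbers is not in the list")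
--     rev = list[::-1]
--     return rev.index(num1) > rev.index(num2)
-- ===== Notes on version B (the rewrite author's own statement) =====
-- stated objective: idiomatic
-- what changed: Replaces the explicit index loop tracking last positions in sentinel variables with membership guards plus a comparison of first-occurrence indices in the reversed list (a smaller reversed index means a later original position).
import Mathlib
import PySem

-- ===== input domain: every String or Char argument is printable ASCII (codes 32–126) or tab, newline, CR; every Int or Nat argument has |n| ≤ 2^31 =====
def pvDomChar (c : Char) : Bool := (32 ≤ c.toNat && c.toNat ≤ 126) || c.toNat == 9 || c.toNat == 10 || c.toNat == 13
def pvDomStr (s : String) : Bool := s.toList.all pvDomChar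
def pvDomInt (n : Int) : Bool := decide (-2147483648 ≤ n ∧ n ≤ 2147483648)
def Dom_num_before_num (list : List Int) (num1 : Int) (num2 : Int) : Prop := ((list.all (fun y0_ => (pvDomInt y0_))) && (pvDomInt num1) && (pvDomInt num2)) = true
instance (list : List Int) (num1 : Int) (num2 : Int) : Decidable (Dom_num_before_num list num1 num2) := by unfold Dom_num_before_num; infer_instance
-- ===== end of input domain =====

-- B replaces A's explicit index loop (last positions in sentinel variables) with membership
-- guards plus a comparison of first-occurrence indices in the reversed list (idiomatic rewrite).


-- ===== PORT A =====
-- the loop body: updates (n1_index, n2_index) at index i, reading list[i]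
def nbnStep (list : List Int) (num1 num2 : Int) (p : Int × Int) (i : Int) : Int × Int :=
  let p1 := if PySem.List.pyGetD list i 0 = num1 then (i, p.2) else p
  if PySem.List.pyGetD list i 0 = num2 then (p1.1, i) else p1

def num_before_num (list : List Int) (num1 : Int) (num2 : Int) : Bool :=
  let st := (PySem.List.pyRange 0 (list.length : Int) 1).foldl (nbnStep list num1 num2) (-55, -55)
  if st.1 = -55 ∨ st.2 = -55 then
    false  -- Python raises Exception here; excluded by Pre_num_before_num
  else
    decide (st.1 < st.2)

-- ===== PORT B =====
def num_before_num_alt (list : List Int) (num1 : Int) (num2 : Int) : Bool :=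
  if num1 ∉ list ∨ num2 ∉ list then
    false  -- Python raises Exception here; excluded by Pre_num_before_num
  else
    let rev := (PySem.List.slice? list none none (-1)).getD []  -- list[::-1]
    match PySem.List.index? rev num1, PySem.List.index? rev num2 with
    | some i, some j => decide (i > j)
    | _, _ => false  -- unreachable under the membership guard

-- ===== PRECONDITION & SPEC =====
-- A (and B) raise Exception when either number is missing from the list.
def Pre_num_before_num (list : List Int) (num1 : Int) (num2 : Int) : Prop :=
  num1 ∈ list ∧ num2 ∈ list
instance (list : List Int) (num1 : Int) (num2 : Int) : Decidable (Pre_num_before_num list num1 num2) := by unfold Pre_num_before_num; infer_instance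

def pvWitness_num_before_num : List Int × Int × Int := ([3, 1, 2, 1], 3, 1)

def Spec_num_before_num (list : List Int) (num1 : Int) (num2 : Int) (out : Bool) : Prop := out = num_before_num_alt list num1 num2
instance (list : List Int) (num1 : Int) (num2 : Int) (out : Bool) : Decidable (Spec_num_before_num list num1 num2 out) := by unfold Spec_num_before_num; infer_instance

-- ===== CLAIM (what is proved, stated in full; the proofs are below) =====
def Claim_equal_num_before_num : Prop := ∀ (list : List Int) (num1 : Int) (num2 : Int), Dom_num_before_num list num1 num2 → Pre_num_before_num list num1 num2 → Spec_num_before_num list num1 num2 (num_before_num list num1 num2)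

-- ===== LEMMAS AND PROOFS =====

-- last-occurrence index of v in l as A's loop computes it (-55 if absent),
-- characterised through the first occurrence in the reversed list
def lastIdx (l : List Int) (v : Int) : Int :=
  match PySem.List.index? l.reverse v with
  | some k => (l.length : Int) - 1 - (k : Int)
  | none => -55

theorem lastIdx_nil (v : Int) : lastIdx [] v = -55 := by
  simp [lastIdx, PySem.List.index?_eq_idxOf?]

theorem lastIdx_append (l : List Int) (x v : Int) :
    lastIdx (l ++ [x]) v = if x = v then (l.length : Int) else lastIdx l v := by
  unfold lastIdx
  rw [List.reverse_append]
  simp only [List.reverse_singleton, List.singleton_append]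
  by_cases h : x = v
  · subst h
    rw [PySem.List.index?_cons_self]
    simp
  · rw [PySem.List.index?_cons_of_ne l.reverse h]
    cases hk : PySem.List.index? l.reverse v with
    | none => simp [h]
    | some k =>
      simp only [Option.map_some]
      simp only [h, if_false, List.length_append, List.length_singleton]
      push_cast
      ring

theorem lastIdx_mem_nonneg (l : List Int) (v : Int) (hv : v ∈ l) :
    0 ≤ lastIdx l v ∧ lastIdx l v < (l.length : Int) := by
  have hmem : v ∈ l.reverse := List.mem_reverse.mpr hv
  cases hk : PySem.List.index? l.reverse v with
  | none =>
    exact absurd hmem ((PySem.List.index?_eq_none_iff _ _).mp hk)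
  | some k =>
    have hklt : k < l.length := by
      obtain ⟨hlt, _⟩ := PySem.List.getElem_of_index?_eq_some hk
      simpa using hlt
    have e : lastIdx l v = (l.length : Int) - 1 - (k : Int) := by
      unfold lastIdx; rw [hk]
    omega

theorem fold_eq_lastIdx (l : List Int) (num1 num2 : Int) :
    (PySem.List.pyRange 0 (l.length : Int) 1).foldl (nbnStep l num1 num2) (-55, -55)
      = (lastIdx l num1, lastIdx l num2) := by
  induction l using List.reverseRecOn with
  | nil => simp [PySem.List.pyRange_one_eq_nil, lastIdx_nil]
  | append_singleton l x ih =>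
    have hlen : ((l ++ [x]).length : Int) = (l.length : Int) + 1 := by simp
    rw [hlen, PySem.List.pyRange_one_succ_right (by positivity), List.foldl_append]
    have hcongr : (PySem.List.pyRange 0 (l.length : Int) 1).foldl (nbnStep (l ++ [x]) num1 num2) (-55, -55)
        = (PySem.List.pyRange 0 (l.length : Int) 1).foldl (nbnStep l num1 num2) (-55, -55) := by
      apply PySem.List.foldl_congr_mem
      intro acc i hi
      have hi' := PySem.List.mem_pyRange_one.mp hi
      have hget : PySem.List.pyGetD (l ++ [x]) i 0 = PySem.List.pyGetD l i 0 := by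
        rw [PySem.List.pyGetD_eq_getElem (l ++ [x]) 0 (by omega) (by simp; omega),
            PySem.List.pyGetD_eq_getElem l 0 (by omega) (by omega)]
        rw [List.getElem_append_left (by omega)]
      simp [nbnStep, hget]
    rw [hcongr, ih]
    have hgetx : PySem.List.pyGetD (l ++ [x]) (l.length : Int) 0 = x := by
      rw [PySem.List.pyGetD_eq_getElem (l ++ [x]) 0 (by positivity) (by simp)]
      simp
    simp only [List.foldl_cons, List.foldl_nil, nbnStep, hgetx]
    rw [lastIdx_append, lastIdx_append]
    by_cases h1 : x = num1 <;> by_cases h2 : x = num2 <;>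
      simp [h1, h2] <;> split_ifs <;> simp_all

theorem num_before_num_spec : Claim_equal_num_before_num := by
  intro l num1 num2 _ hpre
  obtain ⟨h1, h2⟩ := hpre
  unfold Spec_num_before_num num_before_num num_before_num_alt
  rw [fold_eq_lastIdx]
  have hn1 := lastIdx_mem_nonneg l num1 h1
  have hn2 := lastIdx_mem_nonneg l num2 h2
  rw [PySem.List.slice?_none_none_neg_one]
  simp only [Option.getD_some, h1, h2, not_true, or_self, if_false]
  have hmem1 : num1 ∈ l.reverse := List.mem_reverse.mpr h1
  have hmem2 : num2 ∈ l.reverse := List.mem_reverse.mpr h2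
  cases hk1 : PySem.List.index? l.reverse num1 with
  | none => exact absurd hmem1 ((PySem.List.index?_eq_none_iff _ _).mp hk1)
  | some k1 =>
    cases hk2 : PySem.List.index? l.reverse num2 with
    | none => exact absurd hmem2 ((PySem.List.index?_eq_none_iff _ _).mp hk2)
    | some k2 =>
      have e1 : lastIdx l num1 = (l.length : Int) - 1 - (k1 : Int) := by
        unfold lastIdx; rw [hk1]
      have e2 : lastIdx l num2 = (l.length : Int) - 1 - (k2 : Int) := by
        unfold lastIdx; rw [hk2]
      have hne1 : lastIdx l num1 ≠ -55 := by omega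
      have hne2 : lastIdx l num2 ≠ -55 := by omega
      simp only [hne1, hne2, or_self, if_false]
      rw [e1, e2]
      simp only [decide_eq_decide]
      omega
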